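-- pv_equiv track=rewrite | github.com/CUAHSI/QA-AutomationEngine | process-cases/config-out.py | system_sets
-- ===== SOURCE A (Python) =====
-- def pull_states(config_lines, j):
--
--     def get_state(config_line):
--         space_split = config_line.split(' ')
--         if 'TODO' in space_split:
--             return {space_split[-1]:'TODO'}
--         elif 'DONE' in space_split:
--             return {space_split[-1]:'DONE'}
--         else:
--             return {space_split[-1]:'NONE'}
--
--     state_set = {}
--     while config_lines[j].split(' ')[0] != '*': # System line
--         if config_lines[j].split(' ')[0] == '**': # Case line
--             state_set.update(get_state(config_lines[j]))
--         j += 1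
--         if j == len(config_lines):
--             break
--     return state_set
--
-- def system_sets(config_lines):
--     all_suites = {}
--     for i in range(0, len(config_lines)):
--         if config_lines[i].split(' ')[0] == '*': # System line
--             config_line_1 = config_lines[i].split('((')[1]
--             config_line_2 = config_line_1.split('))')[0]
--             system_filename = config_line_2
--             case_states = pull_states(config_lines, i+1)
--             all_suites.update({system_filename:case_states})
--     return all_suites
-- ===== SOURCE B (Python) =====
-- def system_sets(config_lines):
--     # Single pass: maintain the active system and its case states; commit on each
--     # new system line and at the end. Return value identical to A's.
--     def get_state(config_line):
--         space_split = config_line.split(' ')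
--         if 'TODO' in space_split:
--             return {space_split[-1]: 'TODO'}
--         elif 'DONE' in space_split:
--             return {space_split[-1]: 'DONE'}
--         else:
--             return {space_split[-1]: 'NONE'}
--
--     all_suites = {}
--     current = None  # (filename, case_states) of the active system
--     for line in config_lines:
--         first = line.split(' ')[0]
--         if first == '*':
--             if current is not None:
--                 all_suites[current[0]] = current[1]
--             current = (line.split('((')[1].split('))')[0], {})
--         elif first == '**' and current is not None:
--             current[1].update(get_state(line))
--     if current is not None:
--         all_suites[current[0]] = current[1]
--     return all_suites
-- ===== Notes on version B (the rewrite author's own statement) =====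
-- stated objective: simpler
-- what changed: Replaced A's index loop that calls a separate forward-rescanning pull_states helper for every system line by one single pass that carries the active system's name and case-state dict and commits it when the next system line (or the end) is reached.
-- crash fix: When every system line contains '((' but the last line is a system line, A raises IndexError (pull_states indexes config_lines[len]); B returns the suites with that last system mapped to an empty case dict. — e.g. on system_sets(["* ((file1))"]): A raises IndexError, B returns [("file1", [])]
import Mathlib
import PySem

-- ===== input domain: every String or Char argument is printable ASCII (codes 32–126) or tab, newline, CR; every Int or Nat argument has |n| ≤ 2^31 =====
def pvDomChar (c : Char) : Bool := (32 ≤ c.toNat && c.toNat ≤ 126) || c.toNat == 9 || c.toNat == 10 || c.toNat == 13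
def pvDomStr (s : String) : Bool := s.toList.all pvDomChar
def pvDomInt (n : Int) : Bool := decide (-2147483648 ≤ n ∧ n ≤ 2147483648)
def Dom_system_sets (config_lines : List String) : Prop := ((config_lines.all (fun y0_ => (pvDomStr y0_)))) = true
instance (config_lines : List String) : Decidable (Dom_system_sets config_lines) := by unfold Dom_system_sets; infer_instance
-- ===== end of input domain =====

-- B replaces A's outer index loop with nested forward rescans (pull_states) by a single
-- pass that carries the active system and its case states; same return value (simpler).

-- ===== PORT A =====

-- shared helper: s.split(sep) for a nonempty literal sep (split? is none only for sep = ""; exact here)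
def pySplit (s sep : String) : List String := (PySem.Str.split? s sep).getD []

-- shared helper: line.split(' ')[0]  (split with a nonempty separator is never empty, so [0] is the head; exact)
def pyTok0 (l : String) : String := (pySplit l " ").headD ""

-- shared helper: the nested get_state of the Python (identical in A and B)
def get_state (config_line : String) : PySem.Dict String String :=
  let space_split := pySplit config_line " "
  -- space_split[-1]: split with nonempty separator is nonempty, so the -1 index is exact
  let key := (PySem.List.pyGet? space_split (-1)).getD ""
  if space_split.contains "TODO" then PySem.Dict.ofList [(key, "TODO")]
  else if space_split.contains "DONE" then PySem.Dict.ofList [(key, "DONE")]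
  else PySem.Dict.ofList [(key, "NONE")]

-- the while loop of pull_states, j as a Nat index
def pull_statesGo (config_lines : List String) (j : Nat) (state_set : PySem.Dict String String) :
    PySem.Dict String String :=
  if h : j < config_lines.length then    -- config_lines[j]: in range; the else branch is Python's IndexError
    let line := config_lines[j]
    if pyTok0 line = "*" then state_set
    else
      let state_set := if pyTok0 line = "**" then state_set.update (get_state line).items else state_set
      if j + 1 = config_lines.length then state_set
      else pull_statesGo config_lines (j + 1) state_set
  else state_set      -- Python raises IndexError here (reachable only at the initial call); excluded by Pre_
termination_by config_lines.length - j

def pull_states (config_lines : List String) (j : Nat) : PySem.Dict String String :=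
  pull_statesGo config_lines j PySem.Dict.empty

-- for i in range(0, len(config_lines)): …
def system_setsGo (config_lines : List String) (i : Nat)
    (all_suites : PySem.Dict String (PySem.Dict String String)) :
    PySem.Dict String (PySem.Dict String String) :=
  if h : i < config_lines.length then
    let line := config_lines[i]
    let all_suites :=
      if pyTok0 line = "*" then
        -- line.split('((')[1]: IndexError when '((' is absent; excluded by Pre_
        let config_line_1 := (PySem.List.pyGet? (pySplit line "((") 1).getD ""
        -- ….split('))')[0]: split is never empty, so [0] is the head; exact
        let config_line_2 := (pySplit config_line_1 "))").headD ""
        let system_filename := config_line_2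
        let case_states := pull_states config_lines (i + 1)
        all_suites.update [(system_filename, case_states)]
      else all_suites
    system_setsGo config_lines (i + 1) all_suites
  else all_suites
termination_by config_lines.length - i

def system_sets (config_lines : List String) : List (String × List (String × String)) :=
  ((system_setsGo config_lines 0 PySem.Dict.empty).items.map (fun p => (p.1, p.2.items)))

-- ===== PORT B =====

-- line.split('((')[1].split('))')[0]  (the [1] is none = IndexError when '((' is absent; excluded by Pre_)
def extractName (line : String) : String :=
  (pySplit ((PySem.List.pyGet? (pySplit line "((") 1).getD "") "))").headD ""

-- single pass: suites built so far, and the active system (filename, its case states) if any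
def system_sets_altGo (suites : PySem.Dict String (PySem.Dict String String))
    (cur : Option (String × PySem.Dict String String)) :
    List String → PySem.Dict String (PySem.Dict String String)
  | [] =>
    match cur with
    | some (fn, st) => suites.insert fn st
    | none => suites
  | line :: rest =>
    if pyTok0 line = "*" then
      let suites :=
        match cur with
        | some (fn, st) => suites.insert fn st
        | none => suites
      system_sets_altGo suites (some (extractName line, PySem.Dict.empty)) rest
    else if pyTok0 line = "**" then
      match cur with
      | some (fn, st) => system_sets_altGo suites (some (fn, st.update (get_state line).items)) rest
      | none => system_sets_altGo suites none rest
    else system_sets_altGo suites cur rest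

def system_sets_alt (config_lines : List String) : List (String × List (String × String)) :=
  ((system_sets_altGo PySem.Dict.empty none config_lines).items.map (fun p => (p.1, p.2.items)))

-- ===== PRECONDITION & SPEC =====

-- Pre_ excludes exactly the inputs where the Python A raises an IndexError: a system line
-- ('*' first token) without a '((' marker, or a system line as the very last line (pull_states
-- then indexes config_lines[len]).
def Pre_system_sets (config_lines : List String) : Prop :=
  (∀ l ∈ config_lines, pyTok0 l = "*" → 2 ≤ (pySplit l "((").length) ∧
  config_lines.getLast?.map pyTok0 ≠ some "*"

instance (config_lines : List String) : Decidable (Pre_system_sets config_lines) := by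
  unfold Pre_system_sets; infer_instance

def pvWitness_system_sets : List String :=
  ["* suite ((file1))", "** case a TODO", "** case b", "end"]

-- On inputs whose every system line has '((' but whose LAST line is a system line, A raises
-- IndexError (pull_states indexes past the end) while B returns the suites with that last
-- system mapped to an empty case dict.
def Raises_system_sets (config_lines : List String) : Prop :=
  (∀ l ∈ config_lines, pyTok0 l = "*" → 2 ≤ (pySplit l "((").length) ∧
  config_lines.getLast?.map pyTok0 = some "*"

instance (config_lines : List String) : Decidable (Raises_system_sets config_lines) := by
  unfold Raises_system_sets; infer_instance

def pvRaiseWitness_system_sets : List String := ["* ((file1))"]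
def pvRaiseWitnessOut_system_sets : List (String × List (String × String)) := [("file1", [])]

def Spec_system_sets (config_lines : List String) (out : List (String × List (String × String))) : Prop :=
  out = system_sets_alt config_lines
instance (config_lines : List String) (out : List (String × List (String × String))) :
    Decidable (Spec_system_sets config_lines out) := by unfold Spec_system_sets; infer_instance

-- ===== CLAIM (what is proved, stated in full; the proofs are below) =====
def Claim_equal_system_sets : Prop := ∀ (config_lines : List String), Dom_system_sets config_lines → Pre_system_sets config_lines → Spec_system_sets config_lines (system_sets config_lines)

def Claim_raises_system_sets : Prop :=
  (∀ (config_lines : List String), Dom_system_sets config_lines → Raises_system_sets config_lines → ¬ Pre_system_sets config_lines) ∧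
  (Dom_system_sets (pvRaiseWitness_system_sets) ∧ Raises_system_sets (pvRaiseWitness_system_sets) ∧ system_sets_alt (pvRaiseWitness_system_sets) = pvRaiseWitnessOut_system_sets)

-- ===== LEMMAS AND PROOFS =====

-- what pull_states computes on the suffix after a system line
def pvScan : List String → PySem.Dict String String → PySem.Dict String String
  | [], st => st
  | line :: rest, st =>
    if pyTok0 line = "*" then st
    else pvScan rest (if pyTok0 line = "**" then st.update (get_state line).items else st)

-- what A's outer loop computes on a suffix
def pvQ : List String → PySem.Dict String (PySem.Dict String String) → PySem.Dict String (PySem.Dict String String)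
  | [], acc => acc
  | line :: rest, acc =>
    pvQ rest (if pyTok0 line = "*" then acc.update [(extractName line, pvScan rest PySem.Dict.empty)] else acc)

lemma pull_statesGo_eq (config_lines : List String) :
    ∀ (n j : Nat) (st : PySem.Dict String String), config_lines.length - j ≤ n →
      pull_statesGo config_lines j st = pvScan (config_lines.drop j) st := by
  intro n
  induction n with
  | zero =>
    intro j st hj
    have hge : config_lines.length ≤ j := by omega
    rw [pull_statesGo]
    simp [Nat.not_lt.mpr hge, List.drop_eq_nil_of_le hge, pvScan]
  | succ n ih =>
    intro j st hj
    by_cases h : j < config_lines.length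
    · have hdrop := List.drop_eq_getElem_cons h
      rw [pull_statesGo]
      simp only [h, dif_pos, hdrop, pvScan]
      by_cases hstar : pyTok0 config_lines[j] = "*"
      · simp [hstar]
      · simp only [hstar, if_false]
        by_cases hend : j + 1 = config_lines.length
        · simp [hend, pvScan]
        · simp only [hend, if_false]
          exact ih (j + 1) _ (by omega)
    · have hge : config_lines.length ≤ j := by omega
      rw [pull_statesGo]
      simp [Nat.not_lt.mpr hge, List.drop_eq_nil_of_le hge, pvScan]

lemma system_setsGo_eq (config_lines : List String) :
    ∀ (n i : Nat) (acc : PySem.Dict String (PySem.Dict String String)), config_lines.length - i ≤ n →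
      system_setsGo config_lines i acc = pvQ (config_lines.drop i) acc := by
  intro n
  induction n with
  | zero =>
    intro i acc hi
    have hge : config_lines.length ≤ i := by omega
    rw [system_setsGo]
    simp [Nat.not_lt.mpr hge, List.drop_eq_nil_of_le hge, pvQ]
  | succ n ih =>
    intro i acc hi
    by_cases h : i < config_lines.length
    · have hdrop := List.drop_eq_getElem_cons h
      rw [system_setsGo]
      simp only [h, dif_pos, hdrop, pvQ]
      by_cases hstar : pyTok0 config_lines[i] = "*"
      · simp only [hstar, if_true]
        rw [pull_states, pull_statesGo_eq config_lines (config_lines.length - (i + 1)) (i + 1) _ (le_refl _)]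
        exact ih (i + 1) _ (by omega)
      · simp only [hstar, if_false]
        exact ih (i + 1) _ (by omega)
    · have hge : config_lines.length ≤ i := by omega
      rw [system_setsGo]
      simp [Nat.not_lt.mpr hge, List.drop_eq_nil_of_le hge, pvQ]

lemma dict_update_single {κ ν : Type} [BEq κ] (d : PySem.Dict κ ν) (k : κ) (v : ν) :
    PySem.Dict.update d [(k, v)] = d.insert k v := rfl

lemma altGo_some_eq :
    ∀ (rest : List String) (suites : PySem.Dict String (PySem.Dict String String))
      (fn : String) (st : PySem.Dict String String),
      system_sets_altGo suites (some (fn, st)) rest = pvQ rest (suites.insert fn (pvScan rest st)) := by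
  intro rest
  induction rest with
  | nil => intro suites fn st; simp [system_sets_altGo, pvScan, pvQ]
  | cons line rest ih =>
    intro suites fn st
    by_cases hstar : pyTok0 line = "*"
    · simp [system_sets_altGo, hstar, pvScan, pvQ, dict_update_single, ih]
    · by_cases hcase : pyTok0 line = "**"
      · simp [system_sets_altGo, hcase, pvScan, pvQ, ih]
      · simp [system_sets_altGo, hstar, hcase, pvScan, pvQ, ih]

lemma altGo_none_eq :
    ∀ (rest : List String) (suites : PySem.Dict String (PySem.Dict String String)),
      system_sets_altGo suites none rest = pvQ rest suites := by
  intro rest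
  induction rest with
  | nil => intro suites; simp [system_sets_altGo, pvQ]
  | cons line rest ih =>
    intro suites
    by_cases hstar : pyTok0 line = "*"
    · simp [system_sets_altGo, hstar, pvQ, dict_update_single, altGo_some_eq]
    · by_cases hcase : pyTok0 line = "**"
      · simp [system_sets_altGo, hcase, pvQ, ih]
      · simp [system_sets_altGo, hstar, hcase, pvQ, ih]

lemma go_eq_altGo (config_lines : List String) :
    system_setsGo config_lines 0 PySem.Dict.empty =
      system_sets_altGo PySem.Dict.empty none config_lines := by
  rw [altGo_none_eq,
    system_setsGo_eq config_lines config_lines.length 0 _ (by omega)]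
  rfl

-- ===== VERDICT (by name: the statement is the Claim_ definition above) =====
theorem system_sets_spec : Claim_equal_system_sets := by
  intro config_lines _ _
  unfold Spec_system_sets system_sets system_sets_alt
  rw [go_eq_altGo]

@[simp]
theorem system_sets_raises : Claim_raises_system_sets := by
  unfold Claim_raises_system_sets
  refine ⟨?_, by decide⟩
  intro config_lines _ hr hp
  exact hp.2 hr.2
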